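-- pv_equiv track=rewrite | github.com/girishg-dh/algo_and_ds_in_python | random/tunnel_time.py | getSecondsElapsed
-- ===== SOURCE A (Python) =====
-- from typing import List
--
-- def getSecondsElapsed(C: int, N: int, A: List[int], B: List[int], K: int) -> int:
--     tunnels = sorted(zip(A,B))
--     tunnel_time_per_round = sum(end - start for start, end in tunnels)
--     if tunnel_time_per_round == 0:
--         return -1
--     total_time = 0
--     if tunnel_time_per_round <= K:
--         total_time += (K // tunnel_time_per_round) * C
--         K = K % tunnel_time_per_round
--     for start, end in tunnels:
--         next_tunnel_time = end - start
--         if next_tunnel_time < K: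
--             K -= next_tunnel_time
--         else:
--             total_time += start + K
--             K = 0
--             return total_time
--     return -1
-- ===== SOURCE B (Python) =====
-- from itertools import accumulate
--
-- def getSecondsElapsed(C, N, A, B, K):
--     tunnels = sorted(zip(A, B))
--     prefix = [0] + list(accumulate(e - s for s, e in tunnels))
--     total = prefix[-1]
--     if total == 0:
--         return -1
--     rounds = 0
--     if total <= K:
--         rounds, K = divmod(K, total)
--     idx = next((i for i in range(len(tunnels)) if prefix[i + 1] >= K), None)
--     if idx is None:
--         return -1
--     return rounds * C + tunnels[idx][0] + (K - prefix[idx])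
-- ===== Notes on version B (the rewrite author's own statement) =====
-- stated objective: alternative
-- what changed: B replaces A's single mutating accumulate-and-scan loop (running remaining time K decremented per tunnel, early return inside the loop) with a materialised prefix-sum table of tunnel durations, a first-index search over that table, and a closed-form answer start[i] + (K - prefix[i]).
import Mathlib
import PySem

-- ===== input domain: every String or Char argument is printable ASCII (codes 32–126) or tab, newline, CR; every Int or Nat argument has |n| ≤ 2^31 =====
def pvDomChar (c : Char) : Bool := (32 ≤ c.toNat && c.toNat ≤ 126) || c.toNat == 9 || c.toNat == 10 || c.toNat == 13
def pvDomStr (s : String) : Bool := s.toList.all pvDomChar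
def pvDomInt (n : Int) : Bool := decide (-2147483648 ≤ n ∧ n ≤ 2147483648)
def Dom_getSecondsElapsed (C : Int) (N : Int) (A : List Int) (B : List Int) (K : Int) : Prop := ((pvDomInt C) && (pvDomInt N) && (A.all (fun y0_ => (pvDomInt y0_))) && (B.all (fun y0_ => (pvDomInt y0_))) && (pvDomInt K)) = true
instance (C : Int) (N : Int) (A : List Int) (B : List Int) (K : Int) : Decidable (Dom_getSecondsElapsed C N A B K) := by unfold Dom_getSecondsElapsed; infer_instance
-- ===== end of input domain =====

-- B replaces A's destructive accumulate-and-scan loop with a materialised prefix-sum table,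
-- a first-index search over it and a closed-form answer (objective: alternative decomposition).


-- ===== PORT A =====
-- the for-loop with early return, state (total_time, K)
def pvLoopA : List (Int × Int) → Int → Int → Int
  | [], _, _ => -1
  | (s, e) :: rest, total, K =>
      let next := e - s
      if next < K then pvLoopA rest total (K - next)
      else total + s + K

def getSecondsElapsed (C : Int) (N : Int) (A : List Int) (B : List Int) (K : Int) : Int :=
  let tunnels := PySem.List.sorted2 (A.zip B) (fun p => p.1) (fun p => p.2)
  let T := tunnels.foldl (fun acc p => acc + (p.2 - p.1)) 0
  if T = 0 then -1
  else
    let tk : Int × Int :=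
      if T ≤ K then (PySem.Int.floordiv K T * C, PySem.Int.mod K T) else (0, K)
    pvLoopA tunnels tk.1 tk.2

-- ===== PORT B =====
def getSecondsElapsed_alt (C : Int) (N : Int) (A : List Int) (B : List Int) (K : Int) : Int :=
  let tunnels := PySem.List.sorted2 (A.zip B) (fun p => p.1) (fun p => p.2)
  let pfx := List.scanl (· + ·) 0 (tunnels.map (fun p => p.2 - p.1))
  let total := pfx.getLastD 0
  if total = 0 then -1
  else
    let rk : Int × Int :=
      if total ≤ K then (PySem.Int.floordiv K total, PySem.Int.mod K total) else (0, K)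
    match (List.range tunnels.length).find? (fun i => decide (pfx.getD (i + 1) 0 ≥ rk.2)) with
    | none => -1
    | some i => rk.1 * C + (tunnels.getD i (0, 0)).1 + (rk.2 - pfx.getD i 0)

-- ===== PRECONDITION & SPEC =====
def Spec_getSecondsElapsed (C : Int) (N : Int) (A : List Int) (B : List Int) (K : Int) (out : Int) : Prop := out = getSecondsElapsed_alt C N A B K
instance (C : Int) (N : Int) (A : List Int) (B : List Int) (K : Int) (out : Int) : Decidable (Spec_getSecondsElapsed C N A B K out) := by unfold Spec_getSecondsElapsed; infer_instance

-- ===== CLAIM (what is proved, stated in full; the proofs are below) =====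
def Claim_equal_getSecondsElapsed : Prop := ∀ (C : Int) (N : Int) (A : List Int) (B : List Int) (K : Int), Dom_getSecondsElapsed C N A B K → Spec_getSecondsElapsed C N A B K (getSecondsElapsed C N A B K)

-- ===== LEMMAS AND PROOFS =====
-- the last entry of the running prefix table is the fold of the durations
theorem getLastD_scanl_add (l : List Int) : ∀ (a d : Int),
    (List.scanl (· + ·) a l).getLastD d = l.foldl (· + ·) a := by
  induction l with
  | nil => intro a d; simp [List.scanl]
  | cons x xs ih => intro a d; rw [List.scanl_cons, List.getLastD_cons, ih, List.foldl_cons]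

-- A's scan stops at the first index i with prefix[i+1] ≥ K (prefix table built from base c)
theorem loopA_eq_find (ts : List (Int × Int)) : ∀ (c K total : Int),
    pvLoopA ts total K =
      (match (List.range ts.length).find?
          (fun i => decide ((List.scanl (· + ·) c (ts.map (fun p => p.2 - p.1))).getD (i + 1) 0 ≥ K + c)) with
        | none => -1
        | some i => total + (ts.getD i (0, 0)).1
            + ((K + c) - (List.scanl (· + ·) c (ts.map (fun p => p.2 - p.1))).getD i 0)) := by
  induction ts with
  | nil => intro c K total; simp [pvLoopA]
  | cons p rest ih =>
    intro c K total
    obtain ⟨s, e⟩ := p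
    have hK : K - (e - s) + (c + (e - s)) = K + c := by ring
    by_cases h : e - s < K
    · have ih' := ih (c + (e - s)) (K - (e - s)) total
      rw [hK] at ih'
      rw [pvLoopA]
      simp only [if_pos h]
      rw [ih']
      rw [List.map_cons, List.scanl_cons, List.length_cons, List.range_succ_eq_map,
        List.find?_cons_of_neg (by simp; omega), List.find?_map]
      simp only [Function.comp_def, List.getD_cons_succ]
      cases hf : List.find? (fun i => decide ((List.scanl (fun x1 x2 => x1 + x2) (c + (e - s)) (List.map (fun p => p.2 - p.1) rest)).getD (i + 1) 0 ≥ K + c)) (List.range rest.length) with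
      | none => simp
      | some i => simp
    · have h0 : ((c + (e - s)) ≥ K + c) := by omega
      rw [pvLoopA]
      simp only [if_neg h]
      rw [List.map_cons, List.scanl_cons, List.length_cons, List.range_succ_eq_map,
        List.find?_cons_of_pos (by simp; omega)]
      simp only [List.getD_cons_zero]
      ring

-- ===== VERDICT (by name: the statement is the Claim_ definition above) =====
theorem getSecondsElapsed_spec : Claim_equal_getSecondsElapsed := by
  intro C N A B K _
  unfold Spec_getSecondsElapsed getSecondsElapsed getSecondsElapsed_alt
  simp only [getLastD_scanl_add, List.foldl_map]
  set ts := PySem.List.sorted2 (A.zip B) (fun p => p.1) (fun p => p.2) with hts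
  set T := ts.foldl (fun acc p => acc + (p.2 - p.1)) 0 with hT
  by_cases h0 : T = 0
  · simp [h0]
  · simp only [if_neg h0]
    by_cases hk : T ≤ K
    · simp only [if_pos hk]
      have h1 := loopA_eq_find ts 0 (PySem.Int.mod K T) (PySem.Int.floordiv K T * C)
      simpa using h1
    · simp only [if_neg hk]
      have h1 := loopA_eq_find ts 0 K 0
      simpa using h1
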